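-- pv_equiv track=rewrite | github.com/danieloliveira56/santa2023 | src/santa2023/identities.py | replace_moves
-- ===== SOURCE A (Python) =====
-- def replace_moves(permutation, moves1, moves2):
--     if len(moves1) == 0:
--         return
--     for i in range(len(permutation) - len(moves1) + 1):
--         if tuple(permutation[i : i + len(moves1)]) == tuple(moves1):
--             new_permutation = permutation[:i] + list(moves2)
--             if i + len(moves1) < len(permutation):
--                 new_permutation += permutation[i + len(moves1) :]
--             return new_permutation
-- ===== SOURCE B (Python) =====
-- def replace_moves(permutation, moves1, moves2):
--     target = list(moves1)
--     m = len(target)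
--     if m == 0:
--         return None
--     seq = list(permutation)
--     if len(seq) < m:
--         return None
--     out = []
--     window = seq[:m]
--     k = m  # index of the next element to slide into the window
--     while True:
--         if window == target:
--             return out + list(moves2) + seq[k:]
--         if k == len(seq):
--             return None
--         out.append(window.pop(0))
--         window.append(seq[k])
--         k += 1
-- ===== Notes on version B (the rewrite author's own statement) =====
-- stated objective: alternative
-- what changed: Replaces A's index loop that re-slices the list at every position with a sliding-window scan that maintains the current window and the consumed prefix explicitly, never indexing by slice positions.
import Mathlib
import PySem

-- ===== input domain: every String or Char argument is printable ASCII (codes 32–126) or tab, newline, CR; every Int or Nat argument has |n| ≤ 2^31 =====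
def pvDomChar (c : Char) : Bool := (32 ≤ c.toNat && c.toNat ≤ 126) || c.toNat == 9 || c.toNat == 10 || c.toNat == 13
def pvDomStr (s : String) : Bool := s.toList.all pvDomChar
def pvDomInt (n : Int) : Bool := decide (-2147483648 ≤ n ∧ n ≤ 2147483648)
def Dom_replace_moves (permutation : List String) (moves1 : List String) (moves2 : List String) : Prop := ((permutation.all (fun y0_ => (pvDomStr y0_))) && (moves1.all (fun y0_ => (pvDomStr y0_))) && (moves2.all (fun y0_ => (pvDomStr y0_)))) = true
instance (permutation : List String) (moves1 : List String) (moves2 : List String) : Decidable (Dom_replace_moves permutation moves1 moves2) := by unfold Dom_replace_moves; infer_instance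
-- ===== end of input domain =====

-- B replaces A's index loop over slice positions with a sliding-window scan (same cost, different structure).


-- ===== PORT A =====
-- the for-loop with early return, over the list of indices range(len(permutation) - len(moves1) + 1)
def pvLoopA (p m1 m2 : List String) : List Int → Option (List String)
  | [] => none
  | i :: is =>
    if PySem.List.slice p (some i) (some (i + (m1.length : Int))) = m1 then
      some (PySem.List.slice p none (some i) ++ m2 ++
        (if i + (m1.length : Int) < (p.length : Int) then
          PySem.List.slice p (some (i + (m1.length : Int))) none
        else []))
    else pvLoopA p m1 m2 is

def replace_moves (permutation : List String) (moves1 : List String) (moves2 : List String) : Option (List String) :=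
  if moves1.length = 0 then none
  else pvLoopA permutation moves1 moves2
    (PySem.List.pyRange 0 ((permutation.length : Int) - (moves1.length : Int) + 1) 1)

-- ===== PORT B =====
-- the while-loop: out / window / k state; fuel makes the recursion total (never exhausted on reachable states)
def pvLoopB (seq target m2 : List String) (out window : List String) (k : Nat) : Nat → Option (List String)
  | 0 => none
  | fuel + 1 =>
    if window = target then some (out ++ m2 ++ PySem.List.slice seq (some (k : Int)) none)
    else if k = seq.length then none
    else match window with
      | [] => none  -- window.pop(0) on an empty window: unreachable (the window keeps length m ≥ 1)
      | w :: ws =>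
        pvLoopB seq target m2 (out ++ [w]) (ws ++ [PySem.List.pyGetD seq (k : Int) ""]) (k + 1) fuel

def replace_moves_alt (permutation : List String) (moves1 : List String) (moves2 : List String) : Option (List String) :=
  if moves1.length = 0 then none
  else if permutation.length < moves1.length then none
  else pvLoopB permutation moves1 moves2 [] (PySem.List.slice permutation none (some (moves1.length : Int)))
    moves1.length (permutation.length - moves1.length + 1)

-- ===== PRECONDITION & SPEC =====
def Spec_replace_moves (permutation : List String) (moves1 : List String) (moves2 : List String) (out : Option (List String)) : Prop := out = replace_moves_alt permutation moves1 moves2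
instance (permutation : List String) (moves1 : List String) (moves2 : List String) (out : Option (List String)) : Decidable (Spec_replace_moves permutation moves1 moves2 out) := by unfold Spec_replace_moves; infer_instance

-- ===== CLAIM (what is proved, stated in full; the proofs are below) =====
def Claim_equal_replace_moves : Prop := ∀ (permutation : List String) (moves1 : List String) (moves2 : List String), Dom_replace_moves permutation moves1 moves2 → Spec_replace_moves permutation moves1 moves2 (replace_moves permutation moves1 moves2)

-- ===== LEMMAS AND PROOFS =====

theorem pv_main (p m1 m2 : List String) (hm : 1 ≤ m1.length) :
    ∀ (fuel i : Nat), i + m1.length ≤ p.length → p.length - m1.length - i + 1 ≤ fuel →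
    pvLoopB p m1 m2 (p.take i) ((p.drop i).take m1.length) (i + m1.length) fuel =
      pvLoopA p m1 m2 (PySem.List.pyRange (i : Int) ((p.length : Int) - (m1.length : Int) + 1) 1) := by
  intro fuel
  induction fuel with
  | zero => intro i h1 h2; omega
  | succ fuel ih =>
    intro i h1 h2
    rw [PySem.List.pyRange_one_cons (by omega)]
    rw [pvLoopA]; simp only [pvLoopB]; rw [PySem.List.slice_natCast_add]
    by_cases hmatch : (p.drop i).take m1.length = m1
    · rw [if_pos hmatch, if_pos hmatch, PySem.List.slice_from_natCast,
        PySem.List.slice_to_natCast]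
      by_cases hend : (i : Int) + (m1.length : Int) < (p.length : Int)
      · rw [if_pos hend, ← Nat.cast_add, PySem.List.slice_from_natCast]
      · rw [if_neg hend, List.drop_eq_nil_of_le (by omega)]
    · rw [if_neg hmatch, if_neg hmatch]
      by_cases hend : i + m1.length = p.length
      · rw [if_pos hend, PySem.List.pyRange_one_eq_nil (by omega), pvLoopA]
      · rw [if_neg hend]
        have hi : i < p.length := by omega
        have him : i + m1.length < p.length := by omega
        obtain ⟨m', hm'⟩ : ∃ m', m1.length = m' + 1 := ⟨m1.length - 1, by omega⟩
        have hwin : (p.drop i).take m1.length = p[i] :: ((p.drop (i + 1)).take m') := by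
          rw [List.drop_eq_getElem_cons hi, hm', List.take_succ_cons]
        have hout : p.take i ++ [p[i]] = p.take (i + 1) := List.take_append_getElem hi
        have hm'' : m' < (p.drop (i + 1)).length := by simp; omega
        have hget : PySem.List.pyGetD p ((i + m1.length : Nat) : Int) "" = (p.drop (i + 1))[m']'hm'' := by
          rw [PySem.List.pyGetD_natCast, List.getD_eq_getElem p "" him, List.getElem_drop]
          exact getElem_congr_idx (by omega)
        have hnew := List.take_append_getElem hm''
        rw [← hm'] at hnew
        have step := ih (i + 1) (by omega) (by omega)
        rw [← hout, ← hnew, show i + 1 + m1.length = i + m1.length + 1 from by omega, ← hget] at step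
        have hc : (i : Int) + 1 = ((i + 1 : Nat) : Int) := by push_cast; ring
        rw [hwin, hc]
        exact step

-- ===== VERDICT (by name: the statement is the Claim_ definition above) =====
theorem replace_moves_spec : Claim_equal_replace_moves := by
  intro p m1 m2 _
  unfold Spec_replace_moves replace_moves replace_moves_alt
  by_cases h0 : m1.length = 0
  · simp [h0]
  · rw [if_neg h0, if_neg h0]
    by_cases hlt : p.length < m1.length
    · rw [if_pos hlt, PySem.List.pyRange_one_eq_nil (by omega), pvLoopA]
    · rw [if_neg hlt]
      have h := pv_main p m1 m2 (by omega) (p.length - m1.length + 1) 0 (by omega) (by omega)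
      simpa [PySem.List.slice_to_natCast] using h.symm
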